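-- pv_equiv track=rewrite | github.com/Xpotato1024/xpotato-devkit | src/devkit/core/block.py | _find_function_end_python
-- ===== SOURCE A (Python) =====
-- from typing import List, Optional, Tuple
--
-- def _find_function_end_python(lines: List[str], start_idx: int) -> int:
--     """Indentation-based: find end of a Python def/class block."""
--     start_line = lines[start_idx].rstrip("\n").rstrip("\r")
--     start_indent = len(start_line) - len(start_line.lstrip())
--     idx = start_idx + 1
--     last_content = start_idx
--     while idx < len(lines):
--         raw = lines[idx].rstrip("\n").rstrip("\r")
--         stripped = raw.strip()
--         if stripped:  # non-blank line
--             cur_indent = len(raw) - len(raw.lstrip())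
--             # If we reach a line with same or less indentation that is not a
--             # comment or decorator, the block has ended.
--             if cur_indent <= start_indent and not stripped.startswith(("#", "@", ")")):
--                 break
--             last_content = idx
--         idx += 1
--     return last_content + 1
-- ===== SOURCE B (Python) =====
-- def _find_function_end_python(lines, start_idx):
--     """Indentation-based: find end of a Python def/class block (two-pass version)."""
--     start_line = lines[start_idx].rstrip("\n").rstrip("\r")
--     start_indent = len(start_line) - len(start_line.lstrip())
--     # Pass 1: find the first line that ends the block.
--     boundary = len(lines)
--     for idx in range(start_idx + 1, len(lines)):
--         raw = lines[idx].rstrip("\n").rstrip("\r")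
--         stripped = raw.strip()
--         if stripped and (len(raw) - len(raw.lstrip()) <= start_indent
--                          and not stripped.startswith(("#", "@", ")"))):
--             boundary = idx
--             break
--     # Pass 2: last non-blank line before the boundary.
--     for idx in range(boundary - 1, start_idx, -1):
--         if lines[idx].rstrip("\n").rstrip("\r").strip():
--             return idx + 1
--     return start_idx + 1
-- ===== Notes on version B (the rewrite author's own statement) =====
-- stated objective: alternative
-- what changed: A's single forward scan with inline last_content tracking is replaced by two passes: first find the boundary line that ends the block, then scan backward from it for the last non-blank line.
import Mathlib
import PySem

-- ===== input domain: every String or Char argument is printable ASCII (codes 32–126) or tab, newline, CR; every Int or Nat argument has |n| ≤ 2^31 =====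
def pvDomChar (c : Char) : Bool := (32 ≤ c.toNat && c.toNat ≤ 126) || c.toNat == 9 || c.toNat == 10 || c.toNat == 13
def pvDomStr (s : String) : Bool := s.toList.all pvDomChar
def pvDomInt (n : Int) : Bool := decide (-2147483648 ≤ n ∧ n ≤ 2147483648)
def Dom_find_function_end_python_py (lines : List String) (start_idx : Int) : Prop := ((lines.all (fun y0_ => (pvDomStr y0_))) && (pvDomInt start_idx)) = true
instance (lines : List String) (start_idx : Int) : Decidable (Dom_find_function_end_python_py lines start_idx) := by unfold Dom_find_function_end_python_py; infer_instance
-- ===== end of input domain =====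

-- B replaces A's single scan with inline last-content tracking by two passes (find the
-- block boundary, then scan backward for the last non-blank line); objective: alternative.

-- shared line primitives (both Pythons call the same str methods)
-- s.rstrip(ch) for a single-char ch: drop trailing copies of ch (hand port, exact)
def pvRstripCh (cs : List Char) (c : Char) : List Char := (cs.reverse.dropWhile (· == c)).reverse

-- lines[idx].rstrip("\n").rstrip("\r") as a char list (idx may be negative: Python wrap)
def pvRawAt (lines : List String) (idx : Int) : List Char :=
  pvRstripCh (pvRstripCh (PySem.List.pyGetD lines idx "").toList '\n') '\r'

-- len(raw) - len(raw.lstrip())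
def pvIndent (raw : List Char) : Int := (raw.length : Int) - ((PySem.Chars.lstrip raw).length : Int)

-- stripped.startswith(("#", "@", ")")) — single-char prefixes, exact as a head test
def pvStartsCD (stripped : List Char) : Bool :=
  match stripped with
  | [] => false
  | c :: _ => c == '#' || c == '@' || c == ')'

-- ===== PORT A =====
-- the while loop: fuel = len(lines) - idx, state (idx, last_content)
def pvGoA (lines : List String) (startIndent : Int) : Nat → Int → Int → Int
  | 0, _, lastContent => lastContent + 1
  | fuel + 1, idx, lastContent =>
    let raw := pvRawAt lines idx
    let stripped := PySem.Chars.strip raw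
    if stripped.isEmpty then
      pvGoA lines startIndent fuel (idx + 1) lastContent
    else if pvIndent raw ≤ startIndent ∧ pvStartsCD stripped = false then
      lastContent + 1
    else
      pvGoA lines startIndent fuel (idx + 1) idx

def find_function_end_python_py (lines : List String) (start_idx : Int) : Int :=
  let startLine := pvRawAt lines start_idx
  let startIndent := pvIndent startLine
  pvGoA lines startIndent ((lines.length - (start_idx + 1)).toNat) (start_idx + 1) start_idx

-- ===== PORT B =====
-- pass 1: first idx in range(start_idx+1, len(lines)) that ends the block, else len(lines)
def pvBoundary (lines : List String) (startIndent : Int) : List Int → Int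
  | [] => lines.length
  | idx :: rest =>
    let raw := pvRawAt lines idx
    let stripped := PySem.Chars.strip raw
    if !stripped.isEmpty && (decide (pvIndent raw ≤ startIndent) && !pvStartsCD stripped) then
      idx
    else
      pvBoundary lines startIndent rest

-- pass 2: first non-blank idx scanning range(boundary-1, start_idx, -1); fallback start_idx+1
def pvBack (lines : List String) : List Int → Int → Int
  | [], dflt => dflt
  | idx :: rest, dflt =>
    if (PySem.Chars.strip (pvRawAt lines idx)).isEmpty then pvBack lines rest dflt
    else idx + 1

def find_function_end_python_py_alt (lines : List String) (start_idx : Int) : Int :=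
  let startLine := pvRawAt lines start_idx
  let startIndent := pvIndent startLine
  let boundary := pvBoundary lines startIndent (PySem.List.pyRange (start_idx + 1) lines.length 1)
  pvBack lines (PySem.List.pyRange (boundary - 1) start_idx (-1)) (start_idx + 1)

-- ===== PRECONDITION & SPEC =====
-- exactly where lines[start_idx] does not raise IndexError (A is total elsewhere)
def Pre_find_function_end_python_py (lines : List String) (start_idx : Int) : Prop :=
  PySem.Raise.InRange lines.length start_idx
instance (lines : List String) (start_idx : Int) : Decidable (Pre_find_function_end_python_py lines start_idx) := by unfold Pre_find_function_end_python_py; infer_instance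

def pvWitness_find_function_end_python_py : List String × Int := (["def f():", "    x = 1", "", "y"], 0)

def Spec_find_function_end_python_py (lines : List String) (start_idx : Int) (out : Int) : Prop := out = find_function_end_python_py_alt lines start_idx
instance (lines : List String) (start_idx : Int) (out : Int) : Decidable (Spec_find_function_end_python_py lines start_idx out) := by unfold Spec_find_function_end_python_py; infer_instance

-- ===== CLAIM (what is proved, stated in full; the proofs are below) =====
def Claim_equal_find_function_end_python_py : Prop := ∀ (lines : List String) (start_idx : Int), Dom_find_function_end_python_py lines start_idx → Pre_find_function_end_python_py lines start_idx → Spec_find_function_end_python_py lines start_idx (find_function_end_python_py lines start_idx)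

-- ===== LEMMAS AND PROOFS =====

theorem pvBack_append (lines : List String) (l : List Int) (i : Int) (d : Int) :
    pvBack lines (l ++ [i]) d
      = pvBack lines l (if (PySem.Chars.strip (pvRawAt lines i)).isEmpty = true then d else i + 1) := by
  induction l with
  | nil =>
    by_cases hb : (PySem.Chars.strip (pvRawAt lines i)).isEmpty = true
    · simp only [List.nil_append, pvBack, if_pos hb]
    · simp only [List.nil_append, pvBack, if_neg hb]
  | cons x rest ih =>
    simp only [List.cons_append, pvBack]
    by_cases hx : (PySem.Chars.strip (pvRawAt lines x)).isEmpty = true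
    · rw [if_pos hx, if_pos hx, ih]
    · rw [if_neg hx, if_neg hx]

theorem pvBoundary_ge (lines : List String) (si : Int) (a : Int) (l : List Int)
    (hl : ∀ x ∈ l, a ≤ x) (hlen : a ≤ (lines.length : Int)) :
    a ≤ pvBoundary lines si l := by
  induction l with
  | nil => simpa [pvBoundary]
  | cons x rest ih =>
    simp only [pvBoundary]
    split_ifs
    · exact hl x (by simp)
    · exact ih (fun y hy => hl y (by simp [hy]))

-- main invariant: the fuel loop equals boundary search + backward scan
theorem pvGoA_eq (lines : List String) (si : Int) :
    ∀ (fuel : Nat) (idx lc : Int), (lines.length : Int) - idx = fuel →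
    pvGoA lines si fuel idx lc
      = pvBack lines
          (PySem.List.pyRange
            (pvBoundary lines si (PySem.List.pyRange idx lines.length 1) - 1) (idx - 1) (-1))
          (lc + 1) := by
  intro fuel
  induction fuel with
  | zero =>
    intro idx lc h
    have hidx : idx = (lines.length : Int) := by omega
    subst hidx
    simp [pvGoA, PySem.List.pyRange_one_eq_nil le_rfl, pvBoundary,
      PySem.List.pyRange_neg_one_eq_nil
        (by omega : (lines.length : Int) - 1 ≤ (lines.length : Int) - 1),
      pvBack]
  | succ fuel ih =>
    intro idx lc h
    have hlt : idx < (lines.length : Int) := by omega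
    rw [PySem.List.pyRange_one_cons hlt]
    have hb : idx + 1 ≤ pvBoundary lines si (PySem.List.pyRange (idx + 1) lines.length 1) := by
      apply pvBoundary_ge
      · intro x hx
        exact ((PySem.List.mem_pyRange_one).1 hx).1
      · omega
    have hidx1 : idx + 1 - 1 = idx := by omega
    have hsplit :
        PySem.List.pyRange
            (pvBoundary lines si (PySem.List.pyRange (idx + 1) lines.length 1) - 1) (idx - 1) (-1)
          = PySem.List.pyRange
              (pvBoundary lines si (PySem.List.pyRange (idx + 1) lines.length 1) - 1) idx (-1)
            ++ [idx] := by
    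
      have e1 : pvBoundary lines si (PySem.List.pyRange (idx + 1) lines.length 1) - 1 + 1
          = pvBoundary lines si (PySem.List.pyRange (idx + 1) lines.length 1) := by omega
      have e2 : idx - 1 + 1 = idx := by omega
      rw [PySem.List.pyRange_neg_one_eq_reverse, e1, e2,
        PySem.List.pyRange_one_cons (by omega :
          idx < pvBoundary lines si (PySem.List.pyRange (idx + 1) lines.length 1)),
        PySem.List.pyRange_neg_one_eq_reverse, e1]
      simp
    simp only [pvGoA, pvBoundary]
    by_cases hblank : (PySem.Chars.strip (pvRawAt lines idx)).isEmpty = true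
    · rw [if_pos hblank,
        if_neg (by simp [hblank] :
          ¬ (!(PySem.Chars.strip (pvRawAt lines idx)).isEmpty
            && (decide (pvIndent (pvRawAt lines idx) ≤ si)
                && !pvStartsCD (PySem.Chars.strip (pvRawAt lines idx)))) = true),
        ih (idx + 1) lc (by omega), hidx1, hsplit, pvBack_append, if_pos hblank]
    · rw [if_neg hblank]
      by_cases hbrk : pvIndent (pvRawAt lines idx) ≤ si
          ∧ pvStartsCD (PySem.Chars.strip (pvRawAt lines idx)) = false
      · rw [if_pos hbrk,
          if_pos (by simp [hblank, hbrk.1, hbrk.2] :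
            (!(PySem.Chars.strip (pvRawAt lines idx)).isEmpty
              && (decide (pvIndent (pvRawAt lines idx) ≤ si)
                  && !pvStartsCD (PySem.Chars.strip (pvRawAt lines idx)))) = true),
          PySem.List.pyRange_neg_one_eq_nil (by omega : idx - 1 ≤ idx - 1)]
        simp only [pvBack]
      · rw [if_neg hbrk,
          if_neg (by
            simp only [Bool.and_eq_true, decide_eq_true_eq,
              Bool.not_eq_eq_eq_not, not_and]
            intro _ hh
            exact fun hcd => hbrk ⟨hh, by simpa using hcd⟩),
          ih (idx + 1) idx (by omega), hidx1, hsplit, pvBack_append, if_neg hblank]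

-- ===== VERDICT (by name: the statement is the Claim_ definition above) =====
theorem find_function_end_python_py_spec : Claim_equal_find_function_end_python_py := by
  intro lines start_idx _ hpre
  unfold Spec_find_function_end_python_py
  unfold find_function_end_python_py find_function_end_python_py_alt
  have hr : -(lines.length : Int) ≤ start_idx ∧ start_idx < lines.length := by
    simpa [PySem.Raise.InRange] using hpre
  rw [pvGoA_eq lines _ _ (start_idx + 1) start_idx (by omega),
    (by omega : start_idx + 1 - 1 = start_idx)]
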